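-- pv_equiv track=rewrite | github.com/Sh-IT0311/Coding-Test | programmers/level3/주사위 고르기.py | solution
-- ===== SOURCE A (Python) =====
-- from itertools import combinations, product
-- from collections import defaultdict
-- from bisect import bisect_left
--
-- def solution(dice):
--     max_value = 0
--     answer = []
--
--     n = len(dice)
--     TEMPLATE = set(range(n))
--
--     for case_A in combinations(range(n), n // 2):
--         case_A = set(case_A)
--         case_B = tuple(TEMPLATE - case_A)
--         case_A = tuple(case_A)
--
--         selected_A = [dice[i] for i in case_A]
--         selected_B = [dice[i] for i in case_B]
--
--         data_A = defaultdict(int)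
--         for values in product(*selected_A):
--             data_A[sum(values)] += 1
--
--         data_B = defaultdict(int)
--         for values in product(*selected_B):
--             data_B[sum(values)] += 1
--
--         keys_A = list(data_A.keys())
--         keys_A.sort()
--         keys_B = list(data_B.keys())
--         keys_B.sort()
--
--         acc_B = [0] * len(keys_B)
--         acc_B[0] = data_B[keys_B[0]]
--         for i in range(1, len(keys_B)):
--             acc_B[i] = acc_B[i-1] + data_B[keys_B[i]]
--
--         wins = 0
--         sames = 0
--         for i in range(len(keys_A)):
--             idx = bisect_left(keys_B, keys_A[i])
--
--             if idx < len(keys_B):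
--                 if keys_A[i] == keys_B[idx]:
--                     sames += data_A[keys_A[i]] * data_B[keys_B[idx]]
--             if idx > 0:
--                 wins += acc_B[idx-1] * data_A[keys_A[i]]
--
--         if max_value < wins:
--             max_value = wins
--             answer = sorted(map(lambda x : x+1, case_A))
--
--     return answer
-- ===== SOURCE B (Python) =====
-- from itertools import combinations
--
-- def _dist(dice, idxs):
--     # sum distribution of the chosen dice, by per-die convolution (DP)
--     d = {0: 1}
--     for i in idxs:
--         nd = {}
--         for s, c in d.items():
--             for v in dice[i]:
--                 t = s + v
--                 nd[t] = nd.get(t, 0) + c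
--         d = nd
--     return d
--
-- def _wins(dist_a, dist_b):
--     # number of (tuple_a, tuple_b) pairs with sum_a > sum_b, by one merge scan
--     keys_a = sorted(dist_a)
--     keys_b = sorted(dist_b)
--     total = 0
--     cum = 0
--     j = 0
--     for a in keys_a:
--         while j < len(keys_b) and keys_b[j] < a:
--             cum += dist_b[keys_b[j]]
--             j += 1
--         total += dist_a[a] * cum
--     return total
--
-- def solution(dice):
--     n = len(dice)
--     best = 0
--     answer = []
--     for case_a in combinations(range(n), n // 2):
--         case_b = [i for i in range(n) if i not in case_a]
--         w = _wins(_dist(dice, case_a), _dist(dice, case_b))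
--         if best < w:
--             best = w
--             answer = [i + 1 for i in case_a]
--     return answer
-- ===== Notes on version B (the rewrite author's own statement) =====
-- stated objective: alternative
-- what changed: B builds each half's sum distribution by per-die convolution of count dictionaries (DP) instead of enumerating the full Cartesian product of tuples, and counts wins with a single merge scan over the two sorted key lists instead of A's prefix-sum array plus a bisect per key; it is much faster when dice sums collide (the classic small-valued dice), though not on random 32-bit values where all sums are distinct.
import Mathlib
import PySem

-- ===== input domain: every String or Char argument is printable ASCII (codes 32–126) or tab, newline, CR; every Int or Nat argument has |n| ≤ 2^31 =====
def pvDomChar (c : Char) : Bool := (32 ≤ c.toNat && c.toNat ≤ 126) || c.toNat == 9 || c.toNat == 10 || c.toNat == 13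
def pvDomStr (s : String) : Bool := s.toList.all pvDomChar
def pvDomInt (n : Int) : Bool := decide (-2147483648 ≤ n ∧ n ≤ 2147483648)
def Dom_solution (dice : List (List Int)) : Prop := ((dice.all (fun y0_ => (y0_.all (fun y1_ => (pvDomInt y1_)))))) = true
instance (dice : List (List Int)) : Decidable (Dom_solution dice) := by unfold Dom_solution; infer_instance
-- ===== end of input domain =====

-- B replaces A's full Cartesian-product enumeration of each half by a per-die convolution (DP) of the
-- sum distribution, and A's bisect-plus-prefix-array win count by a single merge scan over the sorted keys.

-- shared helper: itertools.combinations(range(n), k) in lexicographic order (used by both Pythons)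
def combosAux : List Int → Nat → List (List Int)
  | _, 0 => [[]]
  | [], _ + 1 => []
  | x :: xs, k + 1 => (combosAux xs k).map (x :: ·) ++ combosAux xs (k + 1)

def pyCombinations (n k : Nat) : List (List Int) :=
  combosAux (PySem.List.pyRange 0 n 1) k

-- shared helper: dice[i] — every index used is in range, so the default is never taken
def getDie (dice : List (List Int)) (i : Int) : List Int :=
  (PySem.List.pyGet? dice i).getD []

-- ===== PORT A =====

-- product(*selected): full Cartesian product, rightmost factor varies fastest
def cartProd : List (List Int) → List (List Int)
  | [] => [[]]
  | d :: ds => d.flatMap (fun v => (cartProd ds).map (v :: ·))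

-- data = defaultdict(int); for values in product(*selected): data[sum(values)] += 1
def buildCounts (tuples : List (List Int)) : PySem.Dict Int Int :=
  tuples.foldl (fun d vs => d.modify vs.sum 0 (· + 1)) PySem.Dict.empty

-- acc_B loop: acc_B[0] = data_B[keys_B[0]]; acc_B[i] = acc_B[i-1] + data_B[keys_B[i]]
def accGo (dB : PySem.Dict Int Int) (cur : Int) : List Int → List Int
  | [] => [cur]
  | k :: ks => cur :: accGo dB (cur + dB.getD k 0) ks

def accOf (dB : PySem.Dict Int Int) : List Int → List Int
  | [] => []
  | k :: ks => accGo dB (dB.getD k 0) ks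

-- the wins/sames loop over keys_A (sames is computed but never used, as in A)
def winsSamesA (dA dB : PySem.Dict Int Int) (keysB accB : List Int) (keysA : List Int) : Int × Int :=
  keysA.foldl (fun ws a =>
    let idx := PySem.List.bisectLeft keysB a
    let sames := if idx < keysB.length then
        (if a = keysB.getD idx 0 then ws.2 + dA.getD a 0 * dB.getD (keysB.getD idx 0) 0 else ws.2)
      else ws.2
    let wins := if 0 < idx then ws.1 + accB.getD (idx - 1) 0 * dA.getD a 0 else ws.1
    (wins, sames)) (0, 0)

def solution (dice : List (List Int)) : List Int :=
  let n := dice.length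
  ((pyCombinations n (n / 2)).foldl (fun (st : Int × List Int) caseA =>
    -- case_B = tuple(TEMPLATE - set(case_A)); ascending order (order is immaterial: only sums are used)
    let caseB := (PySem.List.pyRange 0 (n : Int) 1).filter (fun i => !caseA.contains i)
    let selectedA := caseA.map (getDie dice)
    let selectedB := caseB.map (getDie dice)
    let dataA := buildCounts (cartProd selectedA)
    let dataB := buildCounts (cartProd selectedB)
    let keysA := PySem.List.sorted dataA.keys (fun x => x)
    let keysB := PySem.List.sorted dataB.keys (fun x => x)
    let accB := accOf dataB keysB
    let w := (winsSamesA dataA dataB keysB accB keysA).1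
    if st.1 < w then (w, PySem.List.sorted (caseA.map (· + 1)) (fun x => x)) else st)
    (0, [])).2

-- ===== PORT B =====

-- _dist: d = {0:1}; for i in idxs: nd = {}; for s,c in d.items(): for v in dice[i]: nd[s+v] = nd.get(s+v,0)+c
def convStep (die : List Int) (d : PySem.Dict Int Int) : PySem.Dict Int Int :=
  d.items.foldl (fun nd sc =>
    die.foldl (fun nd v => nd.insert (sc.1 + v) (nd.getD (sc.1 + v) 0 + sc.2)) nd)
    PySem.Dict.empty

def distOf (dice : List (List Int)) (idxs : List Int) : PySem.Dict Int Int :=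
  idxs.foldl (fun d i => convStep (getDie dice i) d) (PySem.Dict.empty.insert 0 1)

-- _wins merge scan: while j < len(keys_b) and keys_b[j] < a: cum += dist_b[keys_b[j]]; j += 1
def advanceB (dB : PySem.Dict Int Int) (a : Int) : List Int → Int → List Int × Int
  | [], cum => ([], cum)
  | k :: ks, cum => if k < a then advanceB dB a ks (cum + dB.getD k 0) else (k :: ks, cum)

def mergeGo (dA dB : PySem.Dict Int Int) : List Int → List Int → Int → Int → Int
  | [], _, _, total => total
  | a :: as', bs, cum, total =>
    let r := advanceB dB a bs cum
    mergeGo dA dB as' r.1 r.2 (total + dA.getD a 0 * r.2)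

def winsB (dA dB : PySem.Dict Int Int) : Int :=
  mergeGo dA dB (PySem.List.sorted dA.keys (fun x => x)) (PySem.List.sorted dB.keys (fun x => x)) 0 0

def solution_alt (dice : List (List Int)) : List Int :=
  let n := dice.length
  ((pyCombinations n (n / 2)).foldl (fun (st : Int × List Int) caseA =>
    let caseB := (PySem.List.pyRange 0 (n : Int) 1).filter (fun i => !caseA.contains i)
    let w := winsB (distOf dice caseA) (distOf dice caseB)
    if st.1 < w then (w, caseA.map (· + 1)) else st)
    (0, [])).2

-- ===== PRECONDITION & SPEC =====
-- Pre_ excludes exactly the inputs with an empty die, on which the Python A raises IndexError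
-- (acc_B[0] = data_B[keys_B[0]] with keys_B empty).
def Pre_solution (dice : List (List Int)) : Prop := ∀ d ∈ dice, d ≠ []
instance (dice : List (List Int)) : Decidable (Pre_solution dice) := by unfold Pre_solution; infer_instance
def pvWitness_solution : List (List Int) := [[1, 2], [3]]

def Spec_solution (dice : List (List Int)) (out : List Int) : Prop := out = solution_alt dice
instance (dice : List (List Int)) (out : List Int) : Decidable (Spec_solution dice out) := by unfold Spec_solution; infer_instance

-- ===== CLAIM (what is proved, stated in full; the proofs are below) =====
def Claim_equal_solution : Prop := ∀ (dice : List (List Int)), Dom_solution dice → Pre_solution dice → Spec_solution dice (solution dice)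

-- ===== LEMMAS AND PROOFS =====
def cnt (sel : List (List Int)) (s : Int) : Nat := ((cartProd sel).map List.sum).count s

theorem cnt_nil (s : Int) : cnt [] s = if s = 0 then 1 else 0 := by
  by_cases h : s = 0 <;> simp [cnt, cartProd, h, eq_comm]

theorem count_map_add (v t : Int) (l : List Int) :
    ((l.map (fun s => v + s)).count t) = l.count (t - v) := by
  have h := List.count_map_of_injective l (fun s => v + s) (fun a b h => by dsimp at h; omega) (t - v)
  have ht : v + (t - v) = t := by omega
  rw [ht] at h
  exact h

theorem cnt_cons (x : List Int) (l : List (List Int)) (t : Int) :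
    cnt (x :: l) t = (x.map (fun v => cnt l (t - v))).sum := by
  simp only [cnt, cartProd, List.map_flatMap, List.count_flatMap]
  congr 1
  refine List.map_congr_left (fun v hv => ?_)
  show List.count t (List.map List.sum (List.map (fun x => v :: x) (cartProd l))) = _
  have h1 : List.map List.sum (List.map (fun x => v :: x) (cartProd l))
      = (List.map List.sum (cartProd l)).map (fun s => v + s) := by
    simp [List.map_map, Function.comp_def]
  rw [h1, count_map_add]

theorem sum_map_comm_nat {α β : Type} (l1 : List α) (l2 : List β) (g : α → β → Nat) :
    (l1.map (fun a => (l2.map (g a)).sum)).sum = (l2.map (fun b => (l1.map (fun a => g a b)).sum)).sum := by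
  induction l1 with
  | nil => simp
  | cons x xs ih => simp [ih, ← List.sum_map_add]

theorem cnt_append_singleton (l : List (List Int)) (e : List Int) (t : Int) :
    cnt (l ++ [e]) t = (e.map (fun v => cnt l (t - v))).sum := by
  induction l generalizing t with
  | nil =>
    simp only [List.nil_append, cnt_cons]
  | cons x xs ih =>
    rw [List.cons_append, cnt_cons]
    have h1 : (x.map (fun v => cnt (xs ++ [e]) (t - v))).sum
        = (x.map (fun v => (e.map (fun w => cnt xs (t - v - w))).sum)).sum := by
      congr 1; exact List.map_congr_left (fun v hv => ih (t - v))
    rw [h1, sum_map_comm_nat]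
    congr 1; refine List.map_congr_left (fun w hw => ?_)
    rw [cnt_cons]
    congr 1; refine List.map_congr_left (fun v hv => ?_)
    congr 1; omega

def DInv (d : PySem.Dict Int Int) (sel : List (List Int)) : Prop :=
  (∀ s, d.getD s 0 = (cnt sel s : Int)) ∧ (∀ s, s ∈ d.keys ↔ cnt sel s ≠ 0) ∧ d.keys.Nodup

theorem buildCounts_eq_counter (tuples : List (List Int)) :
    buildCounts tuples = PySem.Dict.counter (tuples.map List.sum) := by
  rw [PySem.Dict.counter_eq_foldl, buildCounts, List.foldl_map]

theorem dataDict_inv (sel : List (List Int)) : DInv (buildCounts (cartProd sel)) sel := by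
  rw [buildCounts_eq_counter]
  refine ⟨fun s => ?_, fun s => ?_, PySem.Dict.nodup_keys_counter _⟩
  · rw [PySem.Dict.getD_counter]; rfl
  · rw [PySem.Dict.keys_counter, PySem.Set.mem_ofList]
    unfold cnt
    rw [← List.count_pos_iff]
    omega

-- getD as a sum over items, for a dict with Nodup keys
theorem getD_eq_sum_items (d : PySem.Dict Int Int) (h : d.keys.Nodup) (t : Int) :
    d.getD t 0 = ((d.items.filter (fun p => decide (p.1 = t))).map (·.2)).sum := by
  obtain ⟨l⟩ := d
  induction l with
  | nil => simp [PySem.Dict.getD_eq_get?_getD]; rfl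
  | cons p rest ih =>
    obtain ⟨k, v⟩ := p
    simp only [PySem.Dict.getD_eq_get?_getD, PySem.Dict.get?_mk_cons] at *
    by_cases hk : k = t
    · subst hk
      simp only [beq_self_eq_true, if_pos, Option.getD_some, List.filter_cons, decide_eq_true_eq]
      have hrest : ∀ q ∈ rest, q.1 ≠ k := by
        intro q hq
        have : q.1 ∈ rest.map (·.1) := List.mem_map_of_mem hq
        have hnd := h
        simp only [PySem.Dict.keys] at hnd
        intro he
        rw [List.map_cons] at hnd
        exact (List.nodup_cons.mp hnd).1 (he ▸ this)
      have : rest.filter (fun p => decide (p.1 = k)) = [] := by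
        rw [List.filter_eq_nil_iff]
        intro q hq
        simp [hrest q hq]
      rw [this]
      simp
    · have hb : (k == t) = false := by simp [hk]
      rw [hb, if_neg (by simp)]
      have hnd : ({ items := rest } : PySem.Dict Int Int).keys.Nodup := by
        simp only [PySem.Dict.keys] at h ⊢
        rw [List.map_cons] at h
        exact (List.nodup_cons.mp h).2
      rw [ih hnd, List.filter_cons]
      simp [hk]

theorem sum_map_comm_int {α β : Type} (l1 : List α) (l2 : List β) (g : α → β → Int) :
    (l1.map (fun a => (l2.map (g a)).sum)).sum = (l2.map (fun b => (l1.map (fun a => g a b)).sum)).sum := by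
  induction l1 with
  | nil => simp
  | cons x xs ih => simp [ih, ← List.sum_map_add]

theorem sum_filter_map {α : Type} (l : List α) (q : α → Bool) (f : α → Int) :
    ((l.filter q).map f).sum = (l.map (fun x => if q x then f x else 0)).sum := by
  induction l with
  | nil => rfl
  | cons x xs ih =>
    rw [List.filter_cons, List.map_cons]
    by_cases h : q x <;> simp only [h, if_true, if_false, Bool.false_eq_true, List.map_cons, List.sum_cons, ih, zero_add]

theorem count_term (die : List Int) (s c t : Int) :
    ((die.filter (fun v => decide (s + v = t))).map (fun _ => c)).sum = (die.count (t - s) : Int) * c := by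
  rw [PySem.List.sum_map_const_int]
  congr 1
  rw [← List.countP_eq_length_filter, List.count]
  refine congrArg _ (List.countP_congr (fun v _ => ?_))
  simp only [decide_eq_true_eq, beq_iff_eq]
  omega

theorem convStep_eq_foldl (die : List Int) (d : PySem.Dict Int Int) :
    convStep die d = (d.items.flatMap (fun sc => die.map (fun v => (sc.1 + v, sc.2)))).foldl
      (fun nd p => nd.insert p.1 (nd.getD p.1 0 + p.2)) PySem.Dict.empty := by
  rw [List.foldl_flatMap]
  unfold convStep
  congr 1
  funext nd sc
  rw [List.foldl_map]

theorem wcount_getD (P : List (Int × Int)) (nd0 : PySem.Dict Int Int) (t : Int) :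
    (P.foldl (fun nd p => nd.insert p.1 (nd.getD p.1 0 + p.2)) nd0).getD t 0
      = nd0.getD t 0 + ((P.filter (fun p => decide (p.1 = t))).map (·.2)).sum := by
  induction P generalizing nd0 with
  | nil => simp
  | cons p ps ih =>
    rw [List.foldl_cons, ih, List.filter_cons]
    by_cases h : p.1 = t
    · simp only [h, decide_true, if_pos, List.map_cons, List.sum_cons]
      rw [PySem.Dict.getD_insert, if_pos rfl]
      ring
    · simp only [h, decide_false]
      rw [PySem.Dict.getD_insert, if_neg (by omega)]
      simp

theorem sum_flatMap_int {α : Type} (l : List α) (f : α → List Int) :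
    (l.flatMap f).sum = (l.map (fun a => (f a).sum)).sum := by
  induction l with
  | nil => rfl
  | cons x xs ih => simp [List.flatMap_cons, List.sum_append, ih]

theorem convStep_getD (die : List Int) (d : PySem.Dict Int Int) (t : Int) :
    (convStep die d).getD t 0 = (d.items.map (fun sc => (die.count (t - sc.1) : Int) * sc.2)).sum := by
  rw [convStep_eq_foldl, wcount_getD, PySem.Dict.getD_empty, List.filter_flatMap,
    List.map_flatMap, sum_flatMap_int, zero_add]
  congr 1
  refine List.map_congr_left (fun sc _ => ?_)
  rw [List.filter_map, List.map_map]
  have : ((fun x => x.2) ∘ fun v => (sc.1 + v, sc.2)) = (fun _ => sc.2) := rfl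
  rw [this]
  have : ((fun p => decide (p.1 = t)) ∘ fun v => (sc.1 + v, sc.2)) = (fun v => decide (sc.1 + v = t)) := rfl
  rw [this, count_term]

theorem convStep_mem_keys (die : List Int) (d : PySem.Dict Int Int) (t : Int) :
    t ∈ (convStep die d).keys ↔ ∃ sc ∈ d.items, ∃ v ∈ die, sc.1 + v = t := by
  rw [convStep_eq_foldl]
  rw [PySem.Dict.keys_foldl_insert_key _ (fun p : Int × Int => p.1) (fun nd (p : Int × Int) => nd.getD p.1 0 + p.2)]
  rw [PySem.Dict.keys_empty, PySem.Set.update_nil_left, PySem.Set.mem_ofList]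
  simp only [List.mem_map, List.mem_flatMap]
  constructor
  · rintro ⟨p, ⟨sc, hsc, v, hv, rfl⟩, rfl⟩
    exact ⟨sc, hsc, v, hv, rfl⟩
  · rintro ⟨sc, hsc, v, hv, rfl⟩
    exact ⟨(sc.1 + v, sc.2), ⟨sc, hsc, v, hv, rfl⟩, rfl⟩

theorem convStep_nodup (die : List Int) (d : PySem.Dict Int Int) : (convStep die d).keys.Nodup := by
  rw [convStep_eq_foldl]
  exact PySem.Dict.nodup_keys_foldl_insert_key _ (fun p : Int × Int => p.1)
    (fun nd (p : Int × Int) => nd.getD p.1 0 + p.2) _ (by rw [PySem.Dict.keys_empty]; exact List.nodup_nil)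

theorem convStep_inv (die : List Int) (d : PySem.Dict Int Int) (sel : List (List Int)) :
    DInv d sel → DInv (convStep die d) (sel ++ [die]) := by
  rintro ⟨h1, h2, h3⟩
  refine ⟨fun t => ?_, fun t => ?_, convStep_nodup die d⟩
  · rw [convStep_getD, cnt_append_singleton, Nat.cast_list_sum, List.map_map]
    have hr : ∀ v : Int, ((Nat.cast ∘ fun v => cnt sel (t - v)) v : Int) = d.getD (t - v) 0 := by
      intro v; rw [Function.comp_apply, h1]
    rw [List.map_congr_left (fun v _ => hr v)]
    have hitems : ∀ v : Int, d.getD (t - v) 0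
        = (d.items.map (fun p => if decide (p.1 = t - v) then p.2 else 0)).sum := by
      intro v; rw [getD_eq_sum_items d h3, sum_filter_map]
    rw [List.map_congr_left (fun v (_ : v ∈ die) => hitems v), sum_map_comm_int]
    congr 1
    refine List.map_congr_left (fun p _ => ?_)
    rw [← sum_filter_map]
    have hpred : die.filter (fun v => decide (p.1 = t - v)) = die.filter (fun v => decide (p.1 + v = t)) := by
      refine List.filter_congr (fun v _ => ?_)
      simp only [decide_eq_decide]
      omega
    rw [hpred, count_term]
  · rw [convStep_mem_keys, cnt_append_singleton]
    have hz : (die.map (fun v => cnt sel (t - v))).sum = 0 ↔ ∀ v ∈ die, cnt sel (t - v) = 0 := by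
      rw [List.sum_eq_zero_iff]
      constructor
      · intro h v hv; exact h _ (List.mem_map_of_mem hv)
      · rintro h x hx; obtain ⟨v, hv, rfl⟩ := List.mem_map.mp hx; exact h v hv
    constructor
    · rintro ⟨sc, hsc, v, hv, rfl⟩
      intro hzero
      have hc : cnt sel (sc.1 + v - v) = 0 := (hz.mp hzero) v hv
      rw [show sc.1 + v - v = sc.1 by omega] at hc
      have hm : sc.1 ∈ d.keys := by
        simp only [PySem.Dict.keys]; exact List.mem_map.mpr ⟨sc, hsc, rfl⟩
      exact (h2 sc.1).mp hm hc
    · intro hne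
      obtain ⟨v, hv, hcv⟩ : ∃ v ∈ die, cnt sel (t - v) ≠ 0 := by
        by_contra hall
        rw [not_exists] at hall
        simp only [not_and, not_not] at hall
        exact hne (hz.mpr (fun v hv => hall v hv))
      have hm := (h2 (t - v)).mpr hcv
      simp only [PySem.Dict.keys] at hm
      obtain ⟨sc, hsc, hfst⟩ := List.mem_map.mp hm
      exact ⟨sc, hsc, v, hv, by omega⟩

theorem init_inv : DInv (PySem.Dict.empty.insert 0 1) [] := by
  refine ⟨fun s => ?_, fun s => ?_, ?_⟩
  · rw [PySem.Dict.getD_insert, cnt_nil]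
    split <;> simp_all [PySem.Dict.getD_empty]
  · rw [PySem.Dict.mem_keys_insert, PySem.Dict.keys_empty, cnt_nil]
    split <;> simp_all
  · have h := PySem.Dict.keys_insert_of_not_contains (d := PySem.Dict.empty) (k := (0:Int)) (v := (1:Int))
    rw [h (by rw [PySem.Dict.contains_empty]), PySem.Dict.keys_empty]
    exact List.nodup_singleton 0

theorem distOf_inv (dice : List (List Int)) (idxs : List Int) :
    DInv (distOf dice idxs) (idxs.map (getDie dice)) := by
  induction idxs using List.reverseRecOn with
  | nil => exact init_inv
  | append_singleton idxs i ih =>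
    have hd : distOf dice (idxs ++ [i]) = convStep (getDie dice i) (distOf dice idxs) := by
      rw [distOf, distOf, List.foldl_append, List.foldl_cons, List.foldl_nil]
    rw [hd, List.map_append, List.map_singleton]
    exact convStep_inv _ _ _ ih

def Wfun (fA fB : Int → Int) (KA KB : List Int) : Int :=
  (KA.map (fun a => fA a * ((KB.filter (fun b => decide (b < a))).map fB).sum)).sum

theorem takeWhile_length_eq {α : Type} (p : α → Bool) :
    ∀ (xs : List α) (k : Nat), k ≤ xs.length →
    (∀ j (h : j < xs.length), j < k → p xs[j]) →
    (∀ h : k < xs.length, ¬ p xs[k]) →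
    (xs.takeWhile p).length = k
  | [], 0, _, _, _ => rfl
  | [], k + 1, h, _, _ => absurd h (by simp)
  | x :: xs, 0, _, _, h3 => by
    have := h3 (by simp)
    simp only [List.getElem_cons_zero] at this
    rw [List.takeWhile_cons, if_neg (by simpa using this)]
    rfl
  | x :: xs, k + 1, h1, h2, h3 => by
    have hx : p x := by simpa using h2 0 (by simp) (by omega)
    rw [List.takeWhile_cons, if_pos hx]
    simp only [List.length_cons]
    rw [takeWhile_length_eq p xs k (by simpa using h1)
      (fun j hj hjk => by simpa using h2 (j+1) (by simpa using Nat.succ_lt_succ hj) (by omega))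
      (fun h => by simpa using h3 (by simpa using Nat.succ_lt_succ h))]

theorem bisect_eq_takeWhile (xs : List Int) (a : Int) (h : xs.Pairwise (· ≤ ·)) :
    PySem.List.bisectLeft xs a = (xs.takeWhile (fun b => decide (b < a))).length := by
  obtain ⟨h1, h2, h3⟩ := PySem.List.bisectLeft_spec xs a h
  exact (takeWhile_length_eq _ xs (PySem.List.bisectLeft xs a) h1
    (fun j hj hjk => by simpa using h2 j hj hjk)
    (fun hlt => by simpa using h3 _ hlt (le_refl _))).symm

theorem filter_eq_takeWhile_lt (a : Int) :
    ∀ (xs : List Int), xs.Pairwise (· ≤ ·) →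
    xs.filter (fun b => decide (b < a)) = xs.takeWhile (fun b => decide (b < a))
  | [], _ => rfl
  | x :: xs, h => by
    obtain ⟨hx, hxs⟩ := List.pairwise_cons.mp h
    rw [List.filter_cons, List.takeWhile_cons]
    by_cases hlt : x < a
    · rw [if_pos (by simpa using hlt), if_pos (by simpa using hlt),
        filter_eq_takeWhile_lt a xs hxs]
    · rw [if_neg (by simpa using hlt), if_neg (by simpa using hlt)]
      refine List.filter_eq_nil_iff.mpr (fun b hb => by simpa using fun hba => hlt (lt_of_le_of_lt (hx b hb) hba))

theorem accGo_getD (dB : PySem.Dict Int Int) :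
    ∀ (ks : List Int) (cur : Int) (i : Nat), i ≤ ks.length →
    (accGo dB cur ks).getD i 0 = cur + ((ks.take i).map (fun k => dB.getD k 0)).sum
  | [], cur, 0, _ => by simp [accGo]
  | [], cur, i + 1, h => absurd h (by simp)
  | k :: ks, cur, 0, _ => by simp [accGo]
  | k :: ks, cur, i + 1, h => by
    rw [accGo]
    show (accGo dB (cur + dB.getD k 0) ks).getD i 0 = _
    rw [accGo_getD dB ks (cur + dB.getD k 0) i (by simpa using h), List.take_succ_cons]
    simp only [List.map_cons, List.sum_cons]
    ring

theorem accOf_getD (dB : PySem.Dict Int Int) (ks : List Int) (idx : Nat)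
    (h0 : 0 < idx) (h1 : idx ≤ ks.length) :
    (accOf dB ks).getD (idx - 1) 0 = ((ks.take idx).map (fun k => dB.getD k 0)).sum := by
  match ks, idx with
  | [], idx => simp at h1; omega
  | k :: ks, 0 => omega
  | k :: ks, idx + 1 =>
    rw [accOf]
    simp only [Nat.add_sub_cancel]
    rw [accGo_getD dB ks (dB.getD k 0) idx (by simpa using h1), List.take_succ_cons]
    simp

theorem winsA_foldl (dA dB : PySem.Dict Int Int) (keysB accB : List Int) :
    ∀ (KA : List Int) (w0 s0 : Int),
    (KA.foldl (fun ws a =>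
      let idx := PySem.List.bisectLeft keysB a
      let sames := if idx < keysB.length then
          (if a = keysB.getD idx 0 then ws.2 + dA.getD a 0 * dB.getD (keysB.getD idx 0) 0 else ws.2)
        else ws.2
      let wins := if 0 < idx then ws.1 + accB.getD (idx - 1) 0 * dA.getD a 0 else ws.1
      (wins, sames)) (w0, s0)).1
    = w0 + (KA.map (fun a =>
        if 0 < PySem.List.bisectLeft keysB a then
          accB.getD (PySem.List.bisectLeft keysB a - 1) 0 * dA.getD a 0 else 0)).sum
  | [], w0, s0 => by simp
  | a :: KA, w0, s0 => by
    rw [List.foldl_cons, List.map_cons, List.sum_cons]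
    by_cases h : 0 < PySem.List.bisectLeft keysB a
    · simp only [h, if_pos]
      rw [winsA_foldl dA dB keysB accB KA _ _]
      ring
    · simp only [h, if_false]
      rw [winsA_foldl dA dB keysB accB KA _ _]
      ring

theorem winsA_eq_Wfun (dA dB : PySem.Dict Int Int) (KA KB : List Int)
    (hKB : KB.Pairwise (· ≤ ·)) :
    (winsSamesA dA dB KB (accOf dB KB) KA).1 = Wfun (fun a => dA.getD a 0) (fun b => dB.getD b 0) KA KB := by
  rw [winsSamesA, winsA_foldl, Wfun, zero_add]
  congr 1
  refine List.map_congr_left (fun a _ => ?_)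
  rw [bisect_eq_takeWhile KB a hKB, filter_eq_takeWhile_lt a KB hKB]
  by_cases h : 0 < (KB.takeWhile (fun b => decide (b < a))).length
  · rw [if_pos h, accOf_getD dB KB _ h (by
      have := List.takeWhile_prefix (l := KB) (p := fun b => decide (b < a))
      exact this.length_le)]
    have hpre : KB.take (KB.takeWhile (fun b => decide (b < a))).length
        = KB.takeWhile (fun b => decide (b < a)) :=
      ((List.prefix_iff_eq_take.mp (List.takeWhile_prefix _)).symm)
    rw [hpre]
    ring
  · rw [if_neg h]
    have : KB.takeWhile (fun b => decide (b < a)) = [] := List.length_eq_zero_iff.mp (by omega)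
    rw [this]
    simp

theorem advanceB_spec (dB : PySem.Dict Int Int) (a : Int) :
    ∀ (bs : List Int) (cum : Int),
    advanceB dB a bs cum = (bs.dropWhile (fun b => decide (b < a)),
      cum + ((bs.takeWhile (fun b => decide (b < a))).map (fun b => dB.getD b 0)).sum)
  | [], cum => by simp [advanceB]
  | k :: ks, cum => by
    rw [advanceB, List.dropWhile_cons, List.takeWhile_cons]
    by_cases h : k < a
    · rw [if_pos h, if_pos (by simpa using h), if_pos (by simpa using h),
        advanceB_spec dB a ks (cum + dB.getD k 0)]
      simp only [List.map_cons, List.sum_cons]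
      congr 1
      ring
    · rw [if_neg h, if_neg (by simpa using h), if_neg (by simpa using h)]
      simp

theorem mergeGo_eq (dA dB : PySem.Dict Int Int) :
    ∀ (KA bs : List Int) (cum total : Int), KA.Pairwise (· ≤ ·) → bs.Pairwise (· ≤ ·) →
    mergeGo dA dB KA bs cum total
      = total + (KA.map (fun a =>
          dA.getD a 0 * (cum + ((bs.filter (fun b => decide (b < a))).map (fun b => dB.getD b 0)).sum))).sum
  | [], bs, cum, total, _, _ => by simp [mergeGo]
  | a :: KA, bs, cum, total, hKA, hbs => by
    obtain ⟨ha, hKA'⟩ := List.pairwise_cons.mp hKA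
    rw [mergeGo]
    show mergeGo dA dB KA (advanceB dB a bs cum).1 (advanceB dB a bs cum).2
      (total + dA.getD a 0 * (advanceB dB a bs cum).2) = _
    rw [advanceB_spec dB a bs cum]
    have hdrop : (bs.dropWhile (fun b => decide (b < a))).Pairwise (· ≤ ·) :=
      List.Pairwise.sublist (List.dropWhile_sublist _) hbs
    rw [mergeGo_eq dA dB KA _ _ _ hKA' hdrop]
    rw [List.map_cons, List.sum_cons]
    have hfa : bs.filter (fun b => decide (b < a)) = bs.takeWhile (fun b => decide (b < a)) :=
      filter_eq_takeWhile_lt a bs hbs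
    have key : ∀ a' ∈ KA,
        dA.getD a' 0 * (cum + ((bs.takeWhile (fun b => decide (b < a))).map (fun b => dB.getD b 0)).sum
          + (((bs.dropWhile (fun b => decide (b < a))).filter (fun b => decide (b < a'))).map (fun b => dB.getD b 0)).sum)
        = dA.getD a' 0 * (cum + ((bs.filter (fun b => decide (b < a'))).map (fun b => dB.getD b 0)).sum) := by
      intro a' ha'
      have haa' : a ≤ a' := ha a' ha'
      have hsplit : bs.filter (fun b => decide (b < a'))
          = (bs.takeWhile (fun b => decide (b < a))) ++ ((bs.dropWhile (fun b => decide (b < a))).filter (fun b => decide (b < a'))) := by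
        conv_lhs => rw [← List.takeWhile_append_dropWhile (p := fun b => decide (b < a)) (l := bs)]
        rw [List.filter_append]
        congr 1
        refine List.filter_eq_self.mpr (fun b hb => ?_)
        have := List.mem_takeWhile_imp hb
        simp only [decide_eq_true_eq] at this ⊢
        omega
      rw [hsplit, List.map_append, List.sum_append]
      ring
    rw [List.map_congr_left key, hfa]
    ring

theorem combos_sublist : ∀ (l : List Int) (k : Nat) (c : List Int), c ∈ combosAux l k → c.Sublist l
  | l, 0, c, h => by
    rw [combosAux] at h
    rcases List.mem_singleton.mp h with rfl
    exact List.nil_sublist l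
  | [], k + 1, c, h => by rw [combosAux] at h; cases h
  | x :: xs, k + 1, c, h => by
    rw [combosAux, List.mem_append] at h
    rcases h with h | h
    · obtain ⟨c', hc', rfl⟩ := List.mem_map.mp h
      exact (combos_sublist xs k c' hc').cons₂ x
    · exact (combos_sublist xs (k + 1) c h).cons x

theorem sorted_keys_pairwise (d : PySem.Dict Int Int) :
    (PySem.List.sorted d.keys (fun x => x)).Pairwise (· ≤ ·) :=
  PySem.List.sorted_pairwise d.keys (fun x => x)

theorem sorted_keys_eq (d1 d2 : PySem.Dict Int Int) (sel : List (List Int))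
    (h1 : DInv d1 sel) (h2 : DInv d2 sel) :
    PySem.List.sorted d1.keys (fun x => x) = PySem.List.sorted d2.keys (fun x => x) := by
  refine PySem.List.sorted_eq_sorted_of_perm _ _ _ (fun a b h => h) ?_
  refine (List.perm_ext_iff_of_nodup h1.2.2 h2.2.2).mpr (fun s => ?_)
  rw [h1.2.1 s, h2.2.1 s]

theorem Wfun_congr (fA fB gA gB : Int → Int) (KA KB : List Int)
    (hA : ∀ a, fA a = gA a) (hB : ∀ b, fB b = gB b) :
    Wfun fA fB KA KB = Wfun gA gB KA KB := by
  rw [funext hA, funext hB]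

theorem perCase_eq (dice : List (List Int)) (caseA caseB : List Int) :
    (winsSamesA (buildCounts (cartProd (caseA.map (getDie dice))))
      (buildCounts (cartProd (caseB.map (getDie dice))))
      (PySem.List.sorted (buildCounts (cartProd (caseB.map (getDie dice)))).keys (fun x => x))
      (accOf (buildCounts (cartProd (caseB.map (getDie dice))))
        (PySem.List.sorted (buildCounts (cartProd (caseB.map (getDie dice)))).keys (fun x => x)))
      (PySem.List.sorted (buildCounts (cartProd (caseA.map (getDie dice)))).keys (fun x => x))).1
    = winsB (distOf dice caseA) (distOf dice caseB) := by
  have invA1 := dataDict_inv (caseA.map (getDie dice))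
  have invB1 := dataDict_inv (caseB.map (getDie dice))
  have invA2 := distOf_inv dice caseA
  have invB2 := distOf_inv dice caseB
  rw [winsB, winsA_eq_Wfun _ _ _ _ (sorted_keys_pairwise _),
    mergeGo_eq _ _ _ _ _ _ (sorted_keys_pairwise _) (sorted_keys_pairwise _)]
  rw [sorted_keys_eq _ _ _ invA1 invA2, sorted_keys_eq _ _ _ invB1 invB2]
  rw [Wfun_congr _ _ (fun a => (distOf dice caseA).getD a 0) (fun b => (distOf dice caseB).getD b 0) _ _
    (fun a => (invA1.1 a).trans (invA2.1 a).symm) (fun b => (invB1.1 b).trans (invB2.1 b).symm)]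
  rw [Wfun, zero_add]
  congr 1
  refine List.map_congr_left (fun a _ => ?_)
  rw [zero_add]


theorem map_add_one_pairwise (caseA : List Int) (n : Nat) (h : caseA ∈ pyCombinations n (n / 2)) :
    (caseA.map (· + 1)).Pairwise (fun a b => a ≤ b) := by
  have hsub := combos_sublist _ _ _ h
  have hpw : caseA.Pairwise (· < ·) :=
    List.Pairwise.sublist hsub (PySem.List.pairwise_lt_pyRange_one 0 n)
  rw [List.pairwise_map]
  exact hpw.imp (fun hlt => by omega)

-- ===== VERDICT (by name: the statement is the Claim_ definition above) =====
theorem solution_spec : Claim_equal_solution := by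
  intro dice _ _
  unfold Spec_solution solution solution_alt
  refine congrArg Prod.snd ?_
  refine PySem.List.foldl_congr_mem _ _ _ _ ?_
  intro st caseA hmem
  simp only
  rw [perCase_eq dice caseA _]
  rw [PySem.List.sorted_eq_self_of_pairwise _ _ (map_add_one_pairwise caseA dice.length hmem)]
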